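-- pv_equiv track=rewrite | github.com/TommasoOlivero/PON_STAZIONE_METEO | APP_FLASK/App.py | ordinamento
-- ===== SOURCE A (Python) =====
-- def ordinamento(dizionario):
--
--     lista = [elem for elem in dizionario]
--     lista.sort()
--
--     dizionario_ordinato = {}
--     for cor in lista:
--         for valore in dizionario:
--             if(cor == valore):
--                 dizionario_ordinato[valore] = dizionario[valore]
--
--     dizionario_ordinato = doppio_zero(dizionario_ordinato)
--     return dizionario_ordinato
--
-- def doppio_zero(dizionario):
--     cont, lista_zeri = 0, []
--
--     for k in dizionario:
--         if(dizionario[k] == 0):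
--             cont += 1
--             valChiave = k
--             if(cont == 2):
--                 if(dizionario[valChiave] == 0):
--                     lista_zeri.append(valChiave)
--                     valChiave = 0
--     for i in lista_zeri:
--         del dizionario[i]
--     dizionario = dizionario_numero(dizionario)
--     return dizionario
--
-- def dizionario_numero(dizionario):
--     numero_stringa = ""
--     for ind, chiave in enumerate(dizionario):
--         if(ind == 3):
--             numero_stringa += "."
--         numero_stringa += str(int(dizionario[chiave]))
--
--     return numero_stringa
-- ===== SOURCE B (Python) =====
-- def ordinamento(dizionario):
--     vals = [dizionario[k] for k in sorted(dizionario)]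
--     zeros = [i for i, v in enumerate(vals) if v == 0]
--     if len(zeros) >= 2:
--         del vals[zeros[1]]
--     parts = [str(int(v)) for v in vals]
--     return "".join(parts[:3]) + ("." if len(parts) > 3 else "") + "".join(parts[3:])
-- ===== Notes on version B (the rewrite author's own statement) =====
-- stated objective: faster
-- what changed: replaces the quadratic nested key-matching dict rebuild and the stateful second-zero/delete scans with one sorted-values pipeline: sort the keys once, read the values in that order, drop the value at the index of the second zero, and join the string parts with '.' spliced before index 3
import Mathlib
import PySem

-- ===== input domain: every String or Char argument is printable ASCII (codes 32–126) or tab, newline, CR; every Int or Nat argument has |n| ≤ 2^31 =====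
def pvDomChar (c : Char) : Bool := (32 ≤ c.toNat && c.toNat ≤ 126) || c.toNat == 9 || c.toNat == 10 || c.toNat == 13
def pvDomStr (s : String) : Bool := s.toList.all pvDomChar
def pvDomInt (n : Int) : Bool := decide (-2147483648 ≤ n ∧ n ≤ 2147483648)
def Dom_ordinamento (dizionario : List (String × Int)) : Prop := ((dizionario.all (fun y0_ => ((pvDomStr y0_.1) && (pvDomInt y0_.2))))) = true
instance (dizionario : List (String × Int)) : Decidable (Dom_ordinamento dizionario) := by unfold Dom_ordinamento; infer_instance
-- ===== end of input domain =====

-- One honest line: B replaces A's quadratic nested key-matching rebuild and stateful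
-- second-zero/delete scans with one sorted-values pipeline (objective: faster).

-- ===== PORT A =====
-- The Python receives a dict; the association list is read through PySem.Dict.mk
-- (first binding wins on lookup, matching the dict the caller passes).
-- 'dizionario[chiave]' is read with getD _ 0: inside these loops the key is always
-- present (it comes from the dict's own key list), so the default is never used.

-- dizionario_numero(dizionario)
def pvDizNumA (d : PySem.Dict String Int) : List Char :=
  (PySem.List.enumerate d.keys).foldl
    (fun s p => (if p.1 == 3 then s ++ ['.'] else s) ++ PySem.Int.toChars (d.getD p.2 0)) []

-- doppio_zero(dizionario); 'valChiave' is only ever read as the key just assigned,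
-- so the state carried is (cont, lista_zeri)
def pvDoppioZeroA (d : PySem.Dict String Int) : List Char :=
  let st := d.keys.foldl
    (fun (st : Int × List String) k =>
      if d.getD k 0 == 0 then
        (st.1 + 1, if st.1 + 1 == 2 then st.2 ++ [k] else st.2)
      else st) ((0 : Int), ([] : List String))
  let d2 := st.2.foldl (fun dd i => dd.erase i) d
  pvDizNumA d2

def ordinamento (dizionario : List (String × Int)) : String :=
  let d0 : PySem.Dict String Int := PySem.Dict.mk dizionario
  let lista := PySem.List.sorted d0.keys (fun x => x)
  let dord := lista.foldl
    (fun acc cor =>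
      d0.keys.foldl (fun acc valore =>
        if cor == valore then acc.insert valore (d0.getD valore 0) else acc) acc)
    PySem.Dict.empty
  String.ofList (pvDoppioZeroA dord)

-- ===== PORT B =====
def ordinamento_alt (dizionario : List (String × Int)) : String :=
  let d0 : PySem.Dict String Int := PySem.Dict.mk dizionario
  let vals := (PySem.List.sorted d0.keys (fun x => x)).map (fun k => d0.getD k 0)
  let zeros := ((PySem.List.enumerate vals).filter (fun p => p.2 == 0)).map (·.1)
  let vals2 : List Int := match zeros with
    | _ :: j :: _ => vals.eraseIdx j.toNat   -- del vals[zeros[1]]; the index is a nonneg in-range enumerate index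
    | _ => vals
  let parts := vals2.map PySem.Int.toChars
  String.ofList ((parts.take 3).flatten ++ (if 3 < parts.length then ['.'] else []) ++ (parts.drop 3).flatten)

-- ===== PRECONDITION & SPEC =====
-- Pre_ excludes association lists with duplicate keys: the Python argument is a dict,
-- which cannot carry two bindings for one key, so such lists represent no input of A.
def Pre_ordinamento (dizionario : List (String × Int)) : Prop :=
  (dizionario.map Prod.fst).Nodup
instance (dizionario : List (String × Int)) : Decidable (Pre_ordinamento dizionario) := by
  unfold Pre_ordinamento; infer_instance

def pvWitness_ordinamento : (List (String × Int)) := [("b", 0), ("a", 1), ("c", 0)]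

def Spec_ordinamento (dizionario : List (String × Int)) (out : String) : Prop := out = ordinamento_alt dizionario
instance (dizionario : List (String × Int)) (out : String) : Decidable (Spec_ordinamento dizionario out) := by unfold Spec_ordinamento; infer_instance

-- ===== CLAIM (what is proved, stated in full; the proofs are below) =====
def Claim_equal_ordinamento : Prop := ∀ (dizionario : List (String × Int)), Dom_ordinamento dizionario → Pre_ordinamento dizionario → Spec_ordinamento dizionario (ordinamento dizionario)

-- ===== LEMMAS AND PROOFS =====

theorem pv_inner_nomatch (g : String → Int) (cor : String) :
    ∀ (keys : List String) (acc : PySem.Dict String Int), keys.count cor = 0 →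
      keys.foldl (fun acc v => if cor == v then acc.insert v (g v) else acc) acc = acc := by
  intro keys
  induction keys with
  | nil => intro acc _; rfl
  | cons k t ih =>
    intro acc h
    rw [List.count_cons] at h
    have hk : cor ≠ k := by intro e; subst e; simp at h
    rw [List.foldl_cons, if_neg (by simpa using hk)]
    exact ih acc (by omega)

theorem pv_inner_one (g : String → Int) (cor : String) :
    ∀ (keys : List String) (acc : PySem.Dict String Int), keys.count cor = 1 →
      keys.foldl (fun acc v => if cor == v then acc.insert v (g v) else acc) acc
        = acc.insert cor (g cor) := by
  intro keys
  induction keys with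
  | nil => intro acc h; simp [List.count_nil] at h
  | cons k t ih =>
    intro acc h
    rw [List.count_cons] at h
    by_cases hk : cor = k
    · subst hk
      rw [List.foldl_cons, if_pos (by simp)]
      exact pv_inner_nomatch g cor t _ (by simp at h; omega)
    · rw [List.foldl_cons, if_neg (by simpa using hk)]
      exact ih acc (by simp [Ne.symm hk] at h; omega)

theorem pv_getD_mk_map (g : String → Int) (ks : List String) (hnd : ks.Nodup)
    (k : String) (hk : k ∈ ks) :
    (PySem.Dict.mk (ks.map (fun k => (k, g k)))).getD k 0 = g k := by
  apply PySem.Dict.getD_of_mem_items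
  · exact List.mem_map_of_mem hk
  · show (List.map Prod.fst _).Nodup
    rw [List.map_map]
    have e : (Prod.fst ∘ fun k : String => (k, g k)) = id := rfl
    rw [e, List.map_id]
    exact hnd

def pvZPos (g : String → Int) : List String → Nat → List Nat
  | [], _ => []
  | k :: t, i => if g k == 0 then i :: pvZPos g t (i + 1) else pvZPos g t (i + 1)

theorem pv_scan (g : String → Int) :
    ∀ (ks : List String) (c : Int) (_ : 0 ≤ c) (acc : List String),
      (ks.foldl
        (fun (st : Int × List String) k =>
          if g k == 0 then (st.1 + 1, if st.1 + 1 == 2 then st.2 ++ [k] else st.2) else st)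
        (c, acc)).2
      = acc ++ (if 2 ≤ c then [] else ((ks.filter (fun k => g k == 0)).drop (1 - c.toNat)).take 1) := by
  intro ks
  induction ks with
  | nil => intro c hc acc; simp
  | cons k t ih =>
    intro c hc acc
    rw [List.foldl_cons]
    by_cases hz : g k == 0
    · rw [if_pos hz, List.filter_cons, if_pos hz]
      rw [ih (c+1) (by omega) _]
      by_cases h2 : c + 1 = 2
      · have hc1 : c = 1 := by omega
        subst hc1
        simp
      · rw [if_neg (by simpa using h2)]
        by_cases hcc : 2 ≤ c
        · rw [if_pos (by omega : 2 ≤ c + 1), if_pos hcc]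
        · rw [if_neg (by omega : ¬ 2 ≤ c + 1), if_neg hcc]
          have hc0 : c = 0 := by omega
          subst hc0
          simp
    · rw [if_neg hz, List.filter_cons, if_neg hz]
      exact ih c hc acc

theorem pv_zpos_length (g : String → Int) :
    ∀ (l : List String) (i : Nat),
      (pvZPos g l i).length = (l.filter (fun k => g k == 0)).length := by
  intro l
  induction l with
  | nil => intro i; rfl
  | cons k t ih =>
    intro i
    by_cases hz : g k == 0
    · simp [pvZPos, hz, ih]
    · simp [pvZPos, hz, ih]

theorem pv_enum_filter (g : String → Int) :
    ∀ (l : List String) (i : Nat),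
      ((PySem.List.enumerate (l.map g) (i : Int)).filter (fun p => p.2 == 0)).map (·.1)
        = (pvZPos g l i).map (fun n => (n : Int)) := by
  intro l
  induction l with
  | nil => intro i; rfl
  | cons k t ih =>
    intro i
    rw [List.map_cons, PySem.List.enumerate_cons]
    by_cases hz : g k == 0
    · rw [List.filter_cons_of_pos (by simpa using hz)]
      simp only [pvZPos, if_pos hz, List.map_cons]
      congr 1
      have := ih (i+1)
      push_cast at this ⊢
      simpa using this
    · rw [List.filter_cons_of_neg (by simpa using hz)]
      simp only [pvZPos, if_neg hz]
      have := ih (i+1)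
      push_cast at this ⊢
      simpa using this


theorem pv_nth (g : String → Int) :
    ∀ (ks : List String) (i n : Nat), ks.Nodup →
      ∀ z j, (ks.filter (fun k => g k == 0))[n]? = some z →
        (pvZPos g ks i)[n]? = some j →
        i ≤ j ∧ (ks.filter (fun k => !(k == z))).map g = (ks.map g).eraseIdx (j - i) := by
  intro ks
  induction ks with
  | nil => intro i n _ z j h1 _; simp at h1
  | cons k t ih =>
    intro i n hnd z j h1 h2
    have hknt : k ∉ t := (List.nodup_cons.mp hnd).1
    have hndt : t.Nodup := (List.nodup_cons.mp hnd).2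
    by_cases hz : g k == 0
    · rw [List.filter_cons, if_pos hz] at h1
      rw [pvZPos, if_pos hz] at h2
      match n with
      | 0 =>
        simp at h1 h2
        subst h1; subst h2
        refine ⟨le_refl i, ?_⟩
        rw [List.filter_cons, if_neg (by simp), List.map_cons, Nat.sub_self,
          List.eraseIdx_cons_zero]
        rw [List.filter_eq_self.mpr (fun x hx => by
          have hxk : x ≠ k := fun e => hknt (by rw [← e]; exact hx)
          simp [hxk])]
      | n + 1 =>
        simp only [List.getElem?_cons_succ] at h1 h2
        obtain ⟨hij, heq⟩ := ih (i + 1) n hndt z j h1 h2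
        have hzt : z ∈ t := List.mem_of_mem_filter (List.mem_of_getElem? h1)
        refine ⟨by omega, ?_⟩
        have hkz : k ≠ z := fun e => hknt (by rw [e]; exact hzt)
        rw [List.filter_cons, if_pos (by simp [hkz]),
          List.map_cons, List.map_cons]
        have : j - i = (j - (i + 1)) + 1 := by omega
        rw [this, List.eraseIdx_cons_succ, heq]
    · rw [List.filter_cons, if_neg hz] at h1
      rw [pvZPos, if_neg hz] at h2
      obtain ⟨hij, heq⟩ := ih (i + 1) n hndt z j h1 h2
      have hzt : z ∈ t := List.mem_of_mem_filter (List.mem_of_getElem? h1)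
      refine ⟨by omega, ?_⟩
      have hkz : k ≠ z := fun e => hknt (by rw [e]; exact hzt)
      rw [List.filter_cons, if_pos (by simp [hkz]),
        List.map_cons, List.map_cons]
      have : j - i = (j - (i + 1)) + 1 := by omega
      rw [this, List.eraseIdx_cons_succ, heq]

theorem pv_numF (h : String → List Char) :
    ∀ (l : List String) (i : Nat) (acc : List Char),
      (PySem.List.enumerate l (i : Int)).foldl
        (fun s p => (if p.1 == 3 then s ++ ['.'] else s) ++ h p.2) acc
      = acc ++ (if 3 < i then (l.map h).flatten
          else ((l.take (3 - i)).map h).flatten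
            ++ (if 3 - i < l.length then ['.'] else [])
            ++ ((l.drop (3 - i)).map h).flatten) := by
  intro l
  induction l with
  | nil => intro i acc; simp [PySem.List.enumerate]
  | cons k t ih =>
    intro i acc
    rw [PySem.List.enumerate_cons, List.foldl_cons]
    dsimp only
    rw [(by push_cast; ring : (i : Int) + 1 = ((i + 1 : Nat) : Int)),
      ih (i + 1) ((if ((i : Int)) == 3 then acc ++ ['.'] else acc) ++ h k)]
    by_cases h3 : i < 3
    · rw [if_neg (show ¬((i : Int) == 3) = true by simp; omega),
        if_neg (show ¬ 3 < i + 1 by omega), if_neg (show ¬ 3 < i by omega)]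
      have e1 : 3 - i = 3 - (i + 1) + 1 := by omega
      rw [e1, List.take_succ_cons, List.drop_succ_cons, List.map_cons, List.flatten_cons,
        List.length_cons]
      have e2 : (3 - (i + 1) + 1 < t.length + 1) ↔ (3 - (i + 1) < t.length) := by omega
      simp only [e2]
      simp [List.append_assoc]
    · by_cases h4 : i = 3
      · subst h4
        rw [if_pos (show (((3 : Nat) : Int) == 3) = true by simp),
          if_pos (show 3 < 3 + 1 by omega), if_neg (show ¬ (3:Nat) < 3 by omega)]
        simp
      · rw [if_neg (show ¬((i : Int) == 3) = true by simp; omega),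
          if_pos (show 3 < i + 1 by omega), if_pos (show 3 < i by omega)]
        simp

-- dizionario_numero on a dict literal over distinct keys, in B's take/drop form
theorem pv_diznum (g : String → Int) (ks : List String) (hnd : ks.Nodup) :
    pvDizNumA (PySem.Dict.mk (ks.map (fun k => (k, g k))))
      = (((ks.map g).map PySem.Int.toChars).take 3).flatten
        ++ (if 3 < ((ks.map g).map PySem.Int.toChars).length then ['.'] else [])
        ++ (((ks.map g).map PySem.Int.toChars).drop 3).flatten := by
  unfold pvDizNumA
  have hkeys : (PySem.Dict.mk (ks.map (fun k => (k, g k)))).keys = ks := by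
    show List.map Prod.fst _ = ks
    rw [List.map_map]
    have e : (Prod.fst ∘ fun k : String => (k, g k)) = id := rfl
    rw [e, List.map_id]
  rw [hkeys]
  rw [PySem.List.foldl_congr_mem _ _
    (fun s p => (if p.1 == 3 then s ++ ['.'] else s) ++ PySem.Int.toChars (g p.2)) _
    (by
      intro acc p hp
      have hp2 : p.2 ∈ ks := by
        have := PySem.List.map_snd_enumerate ks (0 : Int)
        rw [← this]
        exact List.mem_map_of_mem hp
      rw [pv_getD_mk_map g ks hnd p.2 hp2])]
  have h0 : (0 : Int) = ((0 : Nat) : Int) := by norm_num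
  rw [h0, pv_numF (fun k => PySem.Int.toChars (g k)) ks 0 []]
  rw [if_neg (by omega)]
  simp [List.map_take, List.map_drop, List.map_map, Function.comp_def]

theorem pv_main (dizionario : List (String × Int))
    (hPre : (dizionario.map Prod.fst).Nodup) :
    ordinamento dizionario = ordinamento_alt dizionario := by
  unfold ordinamento ordinamento_alt
  dsimp only
  set d0 : PySem.Dict String Int := PySem.Dict.mk dizionario with hd0
  have hk0 : d0.keys = dizionario.map Prod.fst := rfl
  have hkeys : d0.keys.Nodup := by rw [hk0]; exact hPre
  set g : String → Int := fun k => d0.getD k 0 with hg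
  set ks : List String := PySem.List.sorted d0.keys (fun x => x) with hks
  have hksnd : ks.Nodup := ((PySem.List.sorted_perm d0.keys (fun x => x) false).symm).nodup hkeys
  -- Step 1: the nested build loop produces the dict literal over the sorted keys
  have hbuild :
      ks.foldl (fun acc cor =>
        d0.keys.foldl (fun acc valore =>
          if cor == valore then acc.insert valore (d0.getD valore 0) else acc) acc)
        PySem.Dict.empty
      = PySem.Dict.mk (ks.map (fun k => (k, g k))) := by
    rw [PySem.List.foldl_congr_mem _ _ (fun acc cor => acc.insert cor (g cor)) _
      (by
        intro acc cor hcor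
        have hmem : cor ∈ d0.keys := (PySem.List.mem_sorted _ _ _ _).mp hcor
        exact pv_inner_one g cor d0.keys acc (List.count_eq_one_of_mem hkeys hmem))]
    apply PySem.Dict.ext
    rw [PySem.Dict.items_foldl_insert_fresh ks (fun k => k) g PySem.Dict.empty
      (fun a _ => rfl) (by simpa using hksnd)]
    rfl
  rw [hbuild]
  -- Step 2: the zero scan collects exactly the second zero key
  unfold pvDoppioZeroA
  dsimp only
  have hkeys2 : (PySem.Dict.mk (ks.map (fun k => (k, g k)))).keys = ks := by
    show List.map Prod.fst _ = ks
    rw [List.map_map]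
    have e : (Prod.fst ∘ fun k : String => (k, g k)) = id := rfl
    rw [e, List.map_id]
  rw [hkeys2]
  rw [PySem.List.foldl_congr_mem _ _
    (fun (st : Int × List String) k =>
      if g k == 0 then (st.1 + 1, if st.1 + 1 == 2 then st.2 ++ [k] else st.2) else st) _
    (by
      intro st k hk
      rw [pv_getD_mk_map g ks hksnd k hk])]
  rw [pv_scan g ks 0 (by omega) []]
  rw [if_neg (by omega)]
  -- B's zero positions
  have hzer : ((PySem.List.enumerate (ks.map g)).filter (fun p => p.2 == 0)).map (·.1)
      = (pvZPos g ks 0).map (fun n => (n : Int)) := by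
    have h := pv_enum_filter g ks 0
    rw [Nat.cast_zero] at h
    exact h
  have hlen := pv_zpos_length g ks 0
  rw [hzer]
  -- case on the number of zeros
  cases hZ : ks.filter (fun k => g k == 0) with
  | nil =>
    have : pvZPos g ks 0 = [] := by
      have := hlen; rw [hZ] at this; exact List.eq_nil_of_length_eq_zero this
    rw [this]
    simp only [List.drop_nil, List.take_nil, List.nil_append, List.foldl_nil]
    exact congrArg String.ofList (pv_diznum g ks hksnd)
  | cons z0 Z' =>
    cases hZ' : Z' with
    | nil =>
      have : (pvZPos g ks 0).length = 1 := by rw [hlen, hZ, hZ']; rfl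
      obtain ⟨p0, hp⟩ : ∃ p0, pvZPos g ks 0 = [p0] := by
        match e : pvZPos g ks 0 with
        | [p0] => exact ⟨p0, rfl⟩
        | [] => rw [e] at this; simp at this
        | _ :: _ :: _ => rw [e] at this; simp at this
      rw [hp]
      simp only [Int.toNat_zero, Nat.sub_zero, List.drop_succ_cons, List.take_nil,
        List.drop_nil, List.nil_append, List.foldl_nil]
      exact congrArg String.ofList (pv_diznum g ks hksnd)
    | cons z1 Z'' =>
      -- at least two zeros
      have hlen2 : 2 ≤ (pvZPos g ks 0).length := by rw [hlen, hZ, hZ']; simp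
      obtain ⟨p0, p1, pr, hp⟩ : ∃ p0 p1 pr, pvZPos g ks 0 = p0 :: p1 :: pr := by
        match e : pvZPos g ks 0 with
        | p0 :: p1 :: pr => exact ⟨p0, p1, pr, rfl⟩
        | [] => rw [e] at hlen2; simp at hlen2
        | [p0] => rw [e] at hlen2; simp at hlen2
      rw [hp]
      simp only [Int.toNat_zero, Nat.sub_zero, List.drop_succ_cons, List.drop_zero,
        List.take_succ_cons, List.take_zero, List.nil_append,
        List.foldl_cons, List.foldl_nil]
      -- A side: erase z1; B side: eraseIdx p1
      have hnth := pv_nth g ks 0 1 hksnd z1 p1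
        (by rw [hZ, hZ']; rfl) (by rw [hp]; rfl)
      have herase : (PySem.Dict.mk (ks.map (fun k => (k, g k)))).erase z1
          = PySem.Dict.mk ((ks.filter (fun x => !(x == z1))).map (fun k => (k, g k))) := by
        apply PySem.Dict.ext
        show List.filter _ _ = _
        rw [List.filter_map]
        rfl
      rw [herase]
      have hks2 : (ks.filter (fun x => !(x == z1))).Nodup := List.Nodup.filter _ hksnd
      rw [pv_diznum g _ hks2]
      rw [hnth.2]
      simp [Int.toNat_natCast]

-- ===== VERDICT (by name: the statement is the Claim_ definition above) =====
theorem ordinamento_spec : Claim_equal_ordinamento := by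
  intro dizionario _ hPre
  unfold Spec_ordinamento
  exact pv_main dizionario hPre
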